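-- pv_equiv track=rewrite | github.com/agilasoft/logistics | logistics/air_freight/utils/datahub_unlocode.py | _primary_location_type
-- ===== SOURCE A (Python) =====
-- from typing import Any, Dict, List, Optional
--
-- def _function_string(function_field: str) -> str:
-- 	"""Normalised 8-character UN/LOCODE Function column (UNECE Recommendation 16)."""
-- 	return (function_field or "").ljust(8)[:8]
--
-- def _primary_location_type(functions: List[str], function_field: str = "") -> str:
-- 	s = _function_string(function_field)
-- 	if len(s) >= 8 and s[7] == "B":
-- 		return "Border Crossing"
-- 	order = [
-- 		("4", "Airport"),
-- 		("1", "Port"),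
-- 		("8", "Port"),
-- 		("2", "Railway Station"),
-- 		("3", "Road Terminal"),
-- 		("6", "Multimodal Terminal"),
-- 		("5", "Postal Office"),
-- 		("7", "Other"),
-- 	]
-- 	fs = set(functions)
-- 	for code, label in order:
-- 		if code in fs:
-- 			return label
-- 	return "Other"
-- ===== SOURCE B (Python) =====
-- from typing import List
--
-- _PRIORITY = {
--     "4": (0, "Airport"),
--     "1": (1, "Port"),
--     "8": (2, "Port"),
--     "2": (3, "Railway Station"),
--     "3": (4, "Road Terminal"),
--     "6": (5, "Multimodal Terminal"),
--     "5": (6, "Postal Office"),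
--     "7": (7, "Other"),
-- }
--
-- def _primary_location_type(functions: List[str], function_field: str = "") -> str:
--     if len(function_field) >= 8 and function_field[7] == "B":
--         return "Border Crossing"
--     best = None
--     for f in functions:
--         entry = _PRIORITY.get(f)
--         if entry is not None and (best is None or entry[0] < best[0]):
--             best = entry
--     return best[1] if best is not None else "Other"
-- ===== Notes on version B (the rewrite author's own statement) =====
-- stated objective: alternative
-- what changed: Instead of scanning the fixed 8-entry priority list and testing each code for membership in a set built from the input, B makes a single pass over the input list itself, looking each element up in a code->(rank,label) priority dict and keeping the lowest-rank entry seen; the label of that best entry (or 'Other') is returned, and the border-crossing guard is checked directly on the field without building the padded string.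
import Mathlib
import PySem

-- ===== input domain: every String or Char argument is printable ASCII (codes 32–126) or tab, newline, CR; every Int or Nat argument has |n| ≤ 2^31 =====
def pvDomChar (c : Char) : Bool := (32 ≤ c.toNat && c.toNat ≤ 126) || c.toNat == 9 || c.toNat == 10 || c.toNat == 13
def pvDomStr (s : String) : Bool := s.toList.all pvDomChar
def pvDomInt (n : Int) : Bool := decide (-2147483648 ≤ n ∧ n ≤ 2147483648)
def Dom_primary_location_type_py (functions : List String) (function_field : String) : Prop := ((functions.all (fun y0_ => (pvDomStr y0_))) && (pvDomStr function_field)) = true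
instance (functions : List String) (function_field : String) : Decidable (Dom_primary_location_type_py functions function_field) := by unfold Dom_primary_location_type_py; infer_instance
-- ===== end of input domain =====

-- B replaces A's scan over the fixed priority list (with a set-membership test per code)
-- by a single pass over the input keeping the best (lowest-priority-rank) matching code; objective: alternative/simpler.

-- ===== PORT A =====
-- _function_string: (function_field or "").ljust(8)[:8]; ljust ported by hand (right-pad with spaces), exact
def pvFunctionString (function_field : String) : List Char :=
  (function_field.toList ++ List.replicate (8 - function_field.toList.length) ' ').take 8

-- the for-loop over `order`: first code present in fs wins
def pvLoopA : List (String × String) → PySem.Set String → String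
  | [], _ => "Other"
  | (code, label) :: rest, fs => if fs.contains code then label else pvLoopA rest fs

def primary_location_type_py (functions : List String) (function_field : String) : String :=
  let s := pvFunctionString function_field
  if s.length ≥ 8 ∧ s[7]? = some 'B' then "Border Crossing"
  else
    let order : List (String × String) :=
      [("4", "Airport"), ("1", "Port"), ("8", "Port"), ("2", "Railway Station"),
       ("3", "Road Terminal"), ("6", "Multimodal Terminal"), ("5", "Postal Office"), ("7", "Other")]
    let fs : PySem.Set String := PySem.Set.ofList functions
    pvLoopA order fs

-- ===== PORT B =====
-- the _PRIORITY dict as a lookup function (dict.get)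
def pvPriority (f : String) : Option (Nat × String) :=
  if f = "4" then some (0, "Airport")
  else if f = "1" then some (1, "Port")
  else if f = "8" then some (2, "Port")
  else if f = "2" then some (3, "Railway Station")
  else if f = "3" then some (4, "Road Terminal")
  else if f = "6" then some (5, "Multimodal Terminal")
  else if f = "5" then some (6, "Postal Office")
  else if f = "7" then some (7, "Other")
  else none

-- one step of B's loop: keep the best (lowest-rank) entry seen so far
def pvStepB (best : Option (Nat × String)) (f : String) : Option (Nat × String) :=
  match pvPriority f with
  | none => best
  | some entry =>
    match best with
    | none => some entry
    | some b => if entry.1 < b.1 then some entry else some b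

def primary_location_type_py_alt (functions : List String) (function_field : String) : String :=
  if function_field.toList.length ≥ 8 ∧ function_field.toList[7]? = some 'B' then "Border Crossing"
  else
    match functions.foldl pvStepB none with
    | none => "Other"
    | some b => b.2

-- ===== PRECONDITION & SPEC =====
def Spec_primary_location_type_py (functions : List String) (function_field : String) (out : String) : Prop := out = primary_location_type_py_alt functions function_field
instance (functions : List String) (function_field : String) (out : String) : Decidable (Spec_primary_location_type_py functions function_field out) := by unfold Spec_primary_location_type_py; infer_instance

-- ===== CLAIM (what is proved, stated in full; the proofs are below) =====
def Claim_equal_primary_location_type_py : Prop := ∀ (functions : List String) (function_field : String), Dom_primary_location_type_py functions function_field → Spec_primary_location_type_py functions function_field (primary_location_type_py functions function_field)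

-- ===== LEMMAS AND PROOFS =====

-- the guard conditions of the two ports agree
theorem pv_guard_iff (ff : String) :
    ((pvFunctionString ff).length ≥ 8 ∧ (pvFunctionString ff)[7]? = some 'B') ↔
      (ff.toList.length ≥ 8 ∧ ff.toList[7]? = some 'B') := by
  unfold pvFunctionString
  by_cases h : 8 ≤ ff.toList.length
  · have hrep : 8 - ff.toList.length = 0 := by omega
    rw [hrep]
    simp only [List.replicate_zero, List.append_nil]
    have h7 : (ff.toList.take 8)[7]? = ff.toList[7]? := by
      rw [List.getElem?_take]; simp
    constructor
    · rintro ⟨_, h2⟩; exact ⟨h, by rwa [h7] at h2⟩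
    · rintro ⟨_, h2⟩
      refine ⟨by rw [List.length_take]; omega, by rwa [h7]⟩
  · -- short field: index 7 of the padded string is the pad character ' '
    have hlen : ff.toList.length < 8 := by omega
    constructor
    · rintro ⟨_, h2⟩
      exfalso
      rw [List.getElem?_take] at h2
      simp only [show (7 : ℕ) < 8 by norm_num, if_true] at h2
      rw [List.getElem?_append_right (by omega)] at h2
      rw [List.getElem?_replicate] at h2
      have : (7 : ℕ) - ff.toList.length < 8 - ff.toList.length := by omega
      simp at h2
    · rintro ⟨h1, _⟩
      exact absurd h1 (by omega)

-- codes and labels by priority rank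
def pvCodeOf : Nat → String
  | 0 => "4" | 1 => "1" | 2 => "8" | 3 => "2" | 4 => "3" | 5 => "6" | 6 => "5" | _ => "7"
def pvLabelOf : Nat → String
  | 0 => "Airport" | 1 => "Port" | 2 => "Port" | 3 => "Railway Station" | 4 => "Road Terminal"
  | 5 => "Multimodal Terminal" | 6 => "Postal Office" | _ => "Other"

theorem pvPriority_spec (f : String) (p : Nat × String) (h : pvPriority f = some p) :
    p.1 < 8 ∧ p.2 = pvLabelOf p.1 ∧ f = pvCodeOf p.1 := by
  unfold pvPriority at h
  split_ifs at h with h1 h2 h3 h4 h5 h6 h7 h8 <;>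
    (cases h; subst_vars; exact ⟨by norm_num, rfl, rfl⟩)

theorem pvPriority_codeOf (i : Nat) (hi : i < 8) :
    pvPriority (pvCodeOf i) = some (i, pvLabelOf i) := by
  interval_cases i <;> rfl

-- B's fold computes a minimal-rank priority entry of the input
theorem pvFoldB_some (xs : List String) (a : Nat × String) :
    ∃ b, xs.foldl pvStepB (some a) = some b ∧
      (b = a ∨ ∃ f ∈ xs, pvPriority f = some b) ∧ b.1 ≤ a.1 ∧
      ∀ f ∈ xs, ∀ q, pvPriority f = some q → b.1 ≤ q.1 := by
  induction xs generalizing a with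
  | nil => exact ⟨a, rfl, Or.inl rfl, le_refl _, by simp⟩
  | cons x t ih =>
    simp only [List.foldl_cons]
    cases hp : pvPriority x with
    | none =>
      have hstep : pvStepB (some a) x = some a := by simp [pvStepB, hp]
      rw [hstep]
      obtain ⟨b, h1, h2, h3, h4⟩ := ih a
      refine ⟨b, h1, ?_, h3, ?_⟩
      · rcases h2 with h2 | ⟨f, hf, hpf⟩
        · exact Or.inl h2
        · exact Or.inr ⟨f, List.mem_cons_of_mem _ hf, hpf⟩
      · intro f hf q hq
        rcases List.mem_cons.mp hf with rfl | hf
        · rw [hp] at hq; cases hq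
        · exact h4 f hf q hq
    | some e =>
      by_cases hlt : e.1 < a.1
      · have hstep : pvStepB (some a) x = some e := by simp [pvStepB, hp, hlt]
        rw [hstep]
        obtain ⟨b, h1, h2, h3, h4⟩ := ih e
        refine ⟨b, h1, ?_, by omega, ?_⟩
        · rcases h2 with rfl | ⟨f, hf, hpf⟩
          · exact Or.inr ⟨x, List.mem_cons_self .., hp⟩
          · exact Or.inr ⟨f, List.mem_cons_of_mem _ hf, hpf⟩
        · intro f hf q hq
          rcases List.mem_cons.mp hf with rfl | hf
          · rw [hp] at hq; cases hq; omega
          · exact h4 f hf q hq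
      · have hstep : pvStepB (some a) x = some a := by simp [pvStepB, hp, hlt]
        rw [hstep]
        obtain ⟨b, h1, h2, h3, h4⟩ := ih a
        refine ⟨b, h1, ?_, h3, ?_⟩
        · rcases h2 with h2 | ⟨f, hf, hpf⟩
          · exact Or.inl h2
          · exact Or.inr ⟨f, List.mem_cons_of_mem _ hf, hpf⟩
        · intro f hf q hq
          rcases List.mem_cons.mp hf with rfl | hf
          · rw [hp] at hq; cases hq; omega
          · exact h4 f hf q hq

theorem pvFoldB_spec (xs : List String) :
    (xs.foldl pvStepB none = none ∧ ∀ f ∈ xs, pvPriority f = none) ∨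
    (∃ b, xs.foldl pvStepB none = some b ∧ (∃ f ∈ xs, pvPriority f = some b) ∧
      ∀ f ∈ xs, ∀ q, pvPriority f = some q → b.1 ≤ q.1) := by
  induction xs with
  | nil => exact Or.inl ⟨rfl, by simp⟩
  | cons x t ih =>
    simp only [List.foldl_cons]
    cases hp : pvPriority x with
    | none =>
      have hstep : pvStepB none x = none := by simp [pvStepB, hp]
      rw [hstep]
      rcases ih with ⟨h1, h2⟩ | ⟨b, h1, ⟨f, hf, hpf⟩, h3⟩
      · refine Or.inl ⟨h1, ?_⟩
        intro f hf
        rcases List.mem_cons.mp hf with rfl | hf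
        · exact hp
        · exact h2 f hf
      · refine Or.inr ⟨b, h1, ⟨f, List.mem_cons_of_mem _ hf, hpf⟩, ?_⟩
        intro f' hf' q hq
        rcases List.mem_cons.mp hf' with rfl | hf'
        · rw [hp] at hq; cases hq
        · exact h3 f' hf' q hq
    | some e =>
      have hstep : pvStepB none x = some e := by simp [pvStepB, hp]
      rw [hstep]
      obtain ⟨b, h1, h2, h3, h4⟩ := pvFoldB_some t e
      refine Or.inr ⟨b, h1, ?_, ?_⟩
      · rcases h2 with rfl | ⟨f, hf, hpf⟩
        · exact ⟨x, List.mem_cons_self .., hp⟩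
        · exact ⟨f, List.mem_cons_of_mem _ hf, hpf⟩
      · intro f hf q hq
        rcases List.mem_cons.mp hf with rfl | hf
        · rw [hp] at hq; cases hq; omega
        · exact h4 f hf q hq

-- the body equivalence (after the guard)
theorem pv_body_eq (functions : List String) :
    pvLoopA [("4", "Airport"), ("1", "Port"), ("8", "Port"), ("2", "Railway Station"),
       ("3", "Road Terminal"), ("6", "Multimodal Terminal"), ("5", "Postal Office"), ("7", "Other")]
      (PySem.Set.ofList functions) =
    (match functions.foldl pvStepB none with
     | none => "Other"
     | some b => b.2) := by
  rcases pvFoldB_spec functions with ⟨h1, h2⟩ | ⟨b, h1, ⟨f, hf, hpf⟩, hmin⟩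
  · -- no input element carries a priority code: A's loop finds no code either
    rw [h1]
    have hno : ∀ i, i < 8 → pvCodeOf i ∉ functions := by
      intro i hi hmem
      have := h2 _ hmem
      rw [pvPriority_codeOf i hi] at this; cases this
    have c0 := hno 0 (by norm_num); have c1 := hno 1 (by norm_num)
    have c2 := hno 2 (by norm_num); have c3 := hno 3 (by norm_num)
    have c4 := hno 4 (by norm_num); have c5 := hno 5 (by norm_num)
    have c6 := hno 6 (by norm_num); have c7 := hno 7 (by norm_num)
    simp only [pvCodeOf] at c0 c1 c2 c3 c4 c5 c6 c7
    simp [pvLoopA, c0, c1, c2, c3, c4, c5, c6, c7]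
  · obtain ⟨r, lbl⟩ := b
    rw [h1]
    show pvLoopA _ _ = lbl
    obtain ⟨hb8, hblbl, hbcode⟩ := pvPriority_spec f (r, lbl) hpf
    simp only at hb8 hblbl hbcode hmin
    have hmem : pvCodeOf r ∈ functions := hbcode ▸ hf
    have hnolow : ∀ j, j < r → pvCodeOf j ∉ functions := by
      intro j hj hjm
      have := hmin _ hjm _ (pvPriority_codeOf j (by omega))
      simp at this; omega
    subst hblbl
    interval_cases r
    · simp only [pvCodeOf] at hmem
      simp [pvLoopA, hmem, pvLabelOf]
    · have n0 := hnolow 0 (by norm_num)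
      simp only [pvCodeOf] at hmem n0
      simp [pvLoopA, hmem, n0, pvLabelOf]
    · have n0 := hnolow 0 (by norm_num); have n1 := hnolow 1 (by norm_num)
      simp only [pvCodeOf] at hmem n0 n1
      simp [pvLoopA, hmem, n0, n1, pvLabelOf]
    · have n0 := hnolow 0 (by norm_num); have n1 := hnolow 1 (by norm_num)
      have n2 := hnolow 2 (by norm_num)
      simp only [pvCodeOf] at hmem n0 n1 n2
      simp [pvLoopA, hmem, n0, n1, n2, pvLabelOf]
    · have n0 := hnolow 0 (by norm_num); have n1 := hnolow 1 (by norm_num)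
      have n2 := hnolow 2 (by norm_num); have n3 := hnolow 3 (by norm_num)
      simp only [pvCodeOf] at hmem n0 n1 n2 n3
      simp [pvLoopA, hmem, n0, n1, n2, n3, pvLabelOf]
    · have n0 := hnolow 0 (by norm_num); have n1 := hnolow 1 (by norm_num)
      have n2 := hnolow 2 (by norm_num); have n3 := hnolow 3 (by norm_num)
      have n4 := hnolow 4 (by norm_num)
      simp only [pvCodeOf] at hmem n0 n1 n2 n3 n4
      simp [pvLoopA, hmem, n0, n1, n2, n3, n4, pvLabelOf]
    · have n0 := hnolow 0 (by norm_num); have n1 := hnolow 1 (by norm_num)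
      have n2 := hnolow 2 (by norm_num); have n3 := hnolow 3 (by norm_num)
      have n4 := hnolow 4 (by norm_num); have n5 := hnolow 5 (by norm_num)
      simp only [pvCodeOf] at hmem n0 n1 n2 n3 n4 n5
      simp [pvLoopA, hmem, n0, n1, n2, n3, n4, n5, pvLabelOf]
    · have n0 := hnolow 0 (by norm_num); have n1 := hnolow 1 (by norm_num)
      have n2 := hnolow 2 (by norm_num); have n3 := hnolow 3 (by norm_num)
      have n4 := hnolow 4 (by norm_num); have n5 := hnolow 5 (by norm_num)
      have n6 := hnolow 6 (by norm_num)
      simp only [pvCodeOf] at hmem n0 n1 n2 n3 n4 n5 n6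
      simp [pvLoopA, hmem, n0, n1, n2, n3, n4, n5, n6, pvLabelOf]

-- ===== VERDICT (by name: the statement is the Claim_ definition above) =====
theorem primary_location_type_py_spec : Claim_equal_primary_location_type_py := by
  intro functions function_field _
  unfold Spec_primary_location_type_py
  simp only [primary_location_type_py, primary_location_type_py_alt]
  by_cases hg : function_field.toList.length ≥ 8 ∧ function_field.toList[7]? = some 'B'
  · rw [if_pos ((pv_guard_iff function_field).mpr hg), if_pos hg]
  · rw [if_neg (fun h => hg ((pv_guard_iff function_field).mp h)), if_neg hg]
    exact pv_body_eq functions
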